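-- pv_equiv track=rewrite | github.com/PapyrusNotes/Algorithm-note | greedy/rescue_boat_ver1.py | solution
-- ===== SOURCE A (Python) =====
-- def solution(people, limit):
--     """
--     구명보트를 가장 적게 사용하려면
--     한계에 가장 가까운 몸무게 조합을 먼저 계산한 뒤(탐욕적)
--     제외하고 나머지 몸무게 조합을 계산해야한다.
--     """
--     import copy
--     survivors = copy.deepcopy(people)
--     # survivors = sorted(survivors, reverse=True)  # 큰 몸무게를 가진 사람이 가장 앞에 오게
--     n = len(survivors)
--     answer = 0
--
--     # people 이 빌때까지 (비면 멈추고 answer 반환)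
--     # 생존자를 훑으면서 조건에 맞는 두 원소를 리스트에서 제거한다.(2명 구출)
--     # 다른 것과 더해서 limit을 만족하는 원소가 없을 때는, 가장 앞의 원소를 뺀다.(1명만 구출)
--
--     while survivors:
--         popped = False
--         if n == 1:
--             answer += 1
--             break
--         for i in range(1, n):
--             weight = survivors[0]+survivors[i]
--             if weight <= limit:
--                 survivors.pop(i)    # 0번째 index를 먼저 pop할 시, 다음 i index 위치가 처음과 달라진다.
--                 survivors.pop(0)    # 따라서 반드시 i index를 pop하고, 고정 위치의 0번째 index를 pop해야한다.
--                 answer += 1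
--                 popped = True
--                 n -= 2
--                 break
--         if not popped:
--             survivors.pop(0)
--             answer += 1
--             n -= 1
--     return answer
-- ===== SOURCE B (Python) =====
-- # B: segment tree (persistent tuple tree) of Option-min over positions:
-- # find-first index with value <= threshold, with deletion; O(n log^2 n) vs A's O(n^2).
--
-- def _omin(a, b):
--     if a is None:
--         return b
--     if b is None:
--         return a
--     return min(a, b)
--
--
-- def _tmin(t):
--     return t[1]
--
--
-- def _tsize(t):
--     return 1 if t[0] == 'L' else t[2]
--
--
-- def _build(vals):
--     if len(vals) == 1:
--         return ('L', vals[0])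
--     m = len(vals) // 2
--     l = _build(vals[:m])
--     r = _build(vals[m:])
--     return ('N', _omin(_tmin(l), _tmin(r)), len(vals), l, r)
--
--
-- def _get(t, i):
--     if t[0] == 'L':
--         return t[1] if i == 0 else None
--     l, r = t[3], t[4]
--     m = _tsize(l)
--     return _get(l, i) if i < m else _get(r, i - m)
--
--
-- def _del(t, i):
--     if t[0] == 'L':
--         return ('L', None)
--     sz, l, r = t[2], t[3], t[4]
--     m = _tsize(l)
--     if i < m:
--         l = _del(l, i)
--     else:
--         r = _del(r, i - m)
--     return ('N', _omin(_tmin(l), _tmin(r)), sz, l, r)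
--
--
-- def _first(t, lo, thr):
--     # first index >= lo whose (non-deleted) value is <= thr, or None
--     mn = _tmin(t)
--     if mn is None or mn > thr or lo >= _tsize(t):
--         return None
--     if t[0] == 'L':
--         return 0
--     l, r = t[3], t[4]
--     m = _tsize(l)
--     res = _first(l, lo, thr)
--     if res is not None:
--         return res
--     res = _first(r, lo - m, thr)
--     return None if res is None else m + res
--
--
-- def solution(people, limit):
--     n = len(people)
--     if n == 0:
--         return 0
--     t = _build(people)
--     ans = 0
--     for j in range(n):
--         w = _get(t, j)
--         if w is None:
--             continue
--         ans += 1
--         t = _del(t, j)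
--         k = _first(t, j + 1, limit - w)
--         if k is not None:
--             t = _del(t, k)
--     return ans
-- ===== Notes on version B (the rewrite author's own statement) =====
-- stated objective: alternative
-- what changed: A repeatedly rescans and pops a shrinking list (quadratic worst case); B builds a persistent min-segment-tree over positions once and answers each 'first later index with weight <= limit - front' query plus deletion in polylog time.
import Mathlib
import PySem

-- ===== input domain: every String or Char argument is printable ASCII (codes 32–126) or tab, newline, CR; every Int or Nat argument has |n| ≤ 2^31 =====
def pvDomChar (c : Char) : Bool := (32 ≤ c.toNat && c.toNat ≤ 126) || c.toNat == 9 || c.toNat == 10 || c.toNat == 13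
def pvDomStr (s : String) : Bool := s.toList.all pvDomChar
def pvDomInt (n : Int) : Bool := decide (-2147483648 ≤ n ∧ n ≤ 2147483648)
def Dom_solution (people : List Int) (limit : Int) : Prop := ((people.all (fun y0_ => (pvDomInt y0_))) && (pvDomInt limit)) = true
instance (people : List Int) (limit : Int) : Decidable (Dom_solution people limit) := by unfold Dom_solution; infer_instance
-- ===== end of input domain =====

-- B replaces A's quadratic scan-and-pop loop by a persistent segment tree over positions
-- (minimum weight, Option-valued) supporting "first index ≥ lo with weight ≤ threshold"
-- and deletion; an alternative algorithm with better worst-case behaviour.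

-- ===== PORT A =====

-- 'for i in range(1, n): weight = survivors[0] + survivors[i]; if weight <= limit: … break'
-- returns the i at which the pair was found (the break), none when the loop falls through.
-- The '| _, _ => none' arm is a totality guard for IndexError, unreachable since i < n = len(survivors).
def scanA (limit : Int) (s : List Int) (i n : Int) : Option Int :=
  if i < n then
    match PySem.List.pyGet? s 0, PySem.List.pyGet? s i with
    | some w0, some wi =>
      if w0 + wi ≤ limit then some i else scanA limit s (i + 1) n
    | _, _ => none
  else none
termination_by (n - i).toNat
decreasing_by omega

-- the 'while survivors:' loop; state = (survivors, n, answer).  The 'none' arms of the pops are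
-- totality guards (Python's pop cannot fail there: the indices are in range).
def loopA (limit : Int) (s : List Int) (n answer : Int) : Int :=
  match hs : s with
  | [] => answer
  | _ :: _ =>
    if n = 1 then answer + 1
    else
      match scanA limit s 1 n with
      | some i =>
        match h1 : PySem.List.pop? s i with
        | some (_, s1) =>
          match h2 : PySem.List.pop? s1 0 with
          | some (_, s2) => loopA limit s2 (n - 2) (answer + 1)
          | none => answer + 1
        | none => answer + 1
      | none =>
        match h0 : PySem.List.pop? s 0 with
        | some (_, s2) => loopA limit s2 (n - 1) (answer + 1)
        | none => answer + 1
termination_by s.length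
decreasing_by
  · have e1 := PySem.List.length_of_pop?_eq_some _ h1
    have e2 := PySem.List.length_of_pop?_eq_some _ h2
    subst hs; simp only [List.length_cons] at *; omega
  · have e0 := PySem.List.length_of_pop?_eq_some _ h0
    subst hs; simp only [List.length_cons] at *; omega

def solution (people : List Int) (limit : Int) : Int :=
  loopA limit people (people.length : Int) 0

-- ===== PORT B =====

-- tuple tree ('L', v) / ('N', min, size, l, r) from Source B; deleted leaves hold None ↦ none
inductive BTree where
  | leaf : Option Int → BTree
  | node : Option Int → Nat → BTree → BTree → BTree
deriving Repr

-- _omin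
def omin : Option Int → Option Int → Option Int
  | none, b => b
  | some a, none => some a
  | some a, some b => some (min a b)

-- _tmin
def tmin : BTree → Option Int
  | .leaf v => v
  | .node mn _ _ _ => mn

-- _tsize
def tsize : BTree → Nat
  | .leaf _ => 1
  | .node _ sz _ _ => sz

-- _build; Python never builds the empty list (guarded in solution); '.leaf vs.head?' makes
-- the empty case total and is '.leaf (some v)' on the singleton, exactly as Source B
def build (vs : List Int) : BTree :=
  if vs.length ≤ 1 then .leaf vs.head?
  else
    let m := vs.length / 2
    let l := build (vs.take m)
    let r := build (vs.drop m)
    .node (omin (tmin l) (tmin r)) vs.length l r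
termination_by vs.length
decreasing_by all_goals simp; omega

-- _get (index is a natural: Source B only ever passes j ∈ range(n))
def getv : BTree → Nat → Option Int
  | .leaf v, i => if i = 0 then v else none
  | .node _ _ l r, i =>
    let m := tsize l
    if i < m then getv l i else getv r (i - m)

-- _del
def delv : BTree → Nat → BTree
  | .leaf _, _ => .leaf none
  | .node _ sz l r, i =>
    let m := tsize l
    if i < m then
      let l' := delv l i
      .node (omin (tmin l') (tmin r)) sz l' r
    else
      let r' := delv r (i - m)
      .node (omin (tmin l) (tmin r')) sz l r'

-- _first; Source B tests 'mn is None or mn > thr or lo >= size' then descends.  Source B's 'lo - m'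
-- may go negative in Python; a negative lo behaves exactly like 0 there (the only test on lo
-- at a leaf is 'lo <= 0'), so Nat truncated subtraction is exact.
def firstq (t : BTree) (lo : Nat) (thr : Int) : Option Nat :=
  match t with
  | .leaf v =>
    match v with
    | none => none
    | some mn => if thr < mn ∨ 1 ≤ lo then none else some 0
  | .node mn _ l r =>
    match mn with
    | none => none
    | some mnv =>
      if thr < mnv ∨ tsize t ≤ lo then none
      else
        let m := tsize l
        match firstq l lo thr with
        | some res => some res
        | none =>
          match firstq r (lo - m) thr with
          | some res => some (m + res)
          | none => none

-- 'for j in range(n): …'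
def loopB (limit : Int) (t : BTree) (j n : Nat) (ans : Int) : Int :=
  if j < n then
    match getv t j with
    | none => loopB limit t (j + 1) n ans
    | some w =>
      let t1 := delv t j
      match firstq t1 (j + 1) (limit - w) with
      | some k => loopB limit (delv t1 k) (j + 1) n (ans + 1)
      | none => loopB limit t1 (j + 1) n (ans + 1)
  else ans
termination_by n - j
decreasing_by all_goals omega

def solution_alt (people : List Int) (limit : Int) : Int :=
  if people.length = 0 then 0
  else loopB limit (build people) 0 people.length 0

-- ===== PRECONDITION & SPEC =====
def Spec_solution (people : List Int) (limit : Int) (out : Int) : Prop := out = solution_alt people limit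
instance (people : List Int) (limit : Int) (out : Int) : Decidable (Spec_solution people limit out) := by unfold Spec_solution; infer_instance

-- ===== CLAIM (what is proved, stated in full; the proofs are below) =====
def Claim_equal_solution : Prop := ∀ (people : List Int) (limit : Int), Dom_solution people limit → Spec_solution people limit (solution people limit)

-- ===== LEMMAS AND PROOFS =====

-- the common functional specification: pair the front with the first later fitting weight
def greedy (limit : Int) : List Int → Int
  | [] => 0
  | w :: rest =>
    match rest.findIdx? (fun x => decide (w + x ≤ limit)) with
    | some i => 1 + greedy limit (rest.eraseIdx i)
    | none => 1 + greedy limit rest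
termination_by l => l.length
decreasing_by all_goals (simp only [List.length_eraseIdx, List.length_cons]; first | omega | (split <;> omega))

-- predicate on Option-valued leaves: present and fitting
def optP (p : Int → Bool) : Option Int → Bool
  | some v => p v
  | none => false

-- leaves of a tree, in position order (none = deleted)
def leaves : BTree → List (Option Int)
  | .leaf v => [v]
  | .node _ _ l r => leaves l ++ leaves r

-- structural well-formedness: cached size and min are exact
def WFt : BTree → Prop
  | .leaf _ => True
  | .node mn sz l r => WFt l ∧ WFt r ∧ sz = tsize l + tsize r ∧ mn = omin (tmin l) (tmin r)

theorem omin_eq_none {a b : Option Int} : omin a b = none ↔ a = none ∧ b = none := by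
  cases a <;> cases b <;> simp [omin]

theorem omin_le_left {a : Int} (b : Option Int) : ∃ c, omin (some a) b = some c ∧ c ≤ a := by
  cases b with
  | none => exact ⟨a, rfl, le_refl a⟩
  | some b' => exact ⟨min a b', rfl, min_le_left a b'⟩

theorem omin_le_right (a : Option Int) {b : Int} : ∃ c, omin a (some b) = some c ∧ c ≤ b := by
  cases a with
  | none => exact ⟨b, rfl, le_refl b⟩
  | some a' => exact ⟨min a' b, rfl, min_le_right a' b⟩

theorem tsize_eq : ∀ (t : BTree), WFt t → tsize t = (leaves t).length := by
  intro t
  induction t with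
  | leaf v => intro _; simp [tsize, leaves]
  | node mn sz l r ihl ihr =>
    intro ⟨hl, hr, hsz, _⟩
    show sz = (leaves l ++ leaves r).length
    rw [hsz, ihl hl, ihr hr, List.length_append]

theorem tmin_none : ∀ (t : BTree), WFt t → tmin t = none → ∀ o ∈ leaves t, o = none := by
  intro t
  induction t with
  | leaf v => intro _ h0 o ho; simp [leaves] at ho; simp [tmin] at h0; simp [ho, h0]
  | node mn sz l r ihl ihr =>
    intro ⟨hl, hr, _, hmn⟩ h0 o ho
    have h0' : mn = none := h0
    obtain ⟨el, er⟩ := omin_eq_none.mp (hmn.symm.trans h0')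
    simp only [leaves, List.mem_append] at ho
    rcases ho with h | h
    · exact ihl hl el o h
    · exact ihr hr er o h

theorem tmin_le : ∀ (t : BTree), WFt t → ∀ x : Int, some x ∈ leaves t → ∃ mn, tmin t = some mn ∧ mn ≤ x := by
  intro t
  induction t with
  | leaf v => intro _ x hx; simp [leaves] at hx; exact ⟨x, by simp [tmin, hx], le_refl x⟩
  | node mn sz l r ihl ihr =>
    intro ⟨hl, hr, _, hmn⟩ x hx
    simp only [leaves, List.mem_append] at hx
    rcases hx with h | h
    · obtain ⟨m1, e1, le1⟩ := ihl hl x h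
      rw [e1] at hmn
      obtain ⟨c, ec, lc⟩ := omin_le_left (tmin r)
      exact ⟨c, by rw [tmin, hmn, ec], le_trans lc le1⟩
    · obtain ⟨m1, e1, le1⟩ := ihr hr x h
      rw [e1] at hmn
      obtain ⟨c, ec, lc⟩ := omin_le_right (tmin l)
      exact ⟨c, by rw [tmin, hmn, ec], le_trans lc le1⟩

theorem getv_ok : ∀ (t : BTree), WFt t → ∀ (i : Nat), getv t i = (leaves t).getD i none := by
  intro t
  induction t with
  | leaf v =>
    intro _ i
    rcases i with _ | i <;> simp [getv, leaves]
  | node mn sz l r ihl ihr =>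
    intro ⟨hl, hr, _, _⟩ i
    show (if i < tsize l then getv l i else getv r (i - tsize l)) = _
    rw [tsize_eq l hl]
    by_cases h : i < (leaves l).length
    · simp only [if_pos h, ihl hl, leaves, List.getD_eq_getElem?_getD, List.getElem?_append,
        if_pos h]
    · simp only [if_neg h, ihr hr, leaves, List.getD_eq_getElem?_getD, List.getElem?_append,
        if_neg h]

theorem delv_ok : ∀ (t : BTree), WFt t → ∀ (i : Nat), i < (leaves t).length →
    leaves (delv t i) = (leaves t).set i none ∧ WFt (delv t i) ∧ tsize (delv t i) = tsize t := by
  intro t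
  induction t with
  | leaf v =>
    intro _ i hi
    simp [leaves] at hi
    have : i = 0 := by omega
    subst this
    simp [delv, leaves, tsize, WFt]
  | node mn sz l r ihl ihr =>
    intro ⟨hl, hr, hsz, hmn⟩ i hi
    simp only [leaves, List.length_append] at hi
    simp only [delv]
    by_cases h : i < tsize l
    · have h' : i < (leaves l).length := by rw [← tsize_eq l hl]; exact h
      obtain ⟨e1, w1, s1⟩ := ihl hl i h'
      simp only [if_pos h]
      refine ⟨?_, ⟨w1, hr, ?_, rfl⟩, rfl⟩
      · simp only [leaves, e1, List.set_append, if_pos h']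
      · show sz = tsize (delv l i) + tsize r
        rw [s1]; exact hsz
    · have h' : ¬ i < (leaves l).length := by rw [← tsize_eq l hl]; exact h
      have hir : i - tsize l < (leaves r).length := by rw [tsize_eq l hl]; omega
      obtain ⟨e1, w1, s1⟩ := ihr hr _ hir
      simp only [if_neg h]
      refine ⟨?_, ⟨hl, w1, ?_, rfl⟩, rfl⟩
      · rw [tsize_eq l hl] at e1
        simp only [leaves, tsize_eq l hl, e1, List.set_append, if_neg h']
      · show sz = tsize l + tsize (delv r (i - tsize l))
        rw [s1]; exact hsz

theorem firstq_ok : ∀ (t : BTree), WFt t → ∀ (lo : Nat) (thr : Int),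
    firstq t lo thr
      = (((leaves t).drop lo).findIdx? (optP (fun v => decide (v ≤ thr)))).map (lo + ·) := by
  intro t
  induction t with
  | leaf v =>
    intro _ lo thr
    rcases v with _ | x
    · rcases lo with _ | lo <;> simp [firstq, leaves, optP, List.findIdx?_cons]
    · rcases lo with _ | lo
      · by_cases hx : thr < x
        · simp [firstq, leaves, optP, List.findIdx?_cons, hx, show ¬ x ≤ thr by omega]
        · simp [firstq, leaves, optP, List.findIdx?_cons, hx, show x ≤ thr by omega]
      · simp [firstq, leaves]
  | node mn sz l r ihl ihr =>
    intro hw lo thr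
    obtain ⟨hl, hr, hsz, hmn⟩ := hw
    have hL : tsize l = (leaves l).length := tsize_eq l hl
    have hlen : sz = (leaves l).length + (leaves r).length := by
      rw [hsz, hL, tsize_eq r hr]
    rcases mn with _ | mnv
    · have hall := tmin_none (.node none sz l r) ⟨hl, hr, hsz, hmn⟩ rfl
      have hnone : ((leaves (BTree.node none sz l r)).drop lo).findIdx?
          (optP (fun v => decide (v ≤ thr))) = none := by
        rw [List.findIdx?_eq_none_iff]
        intro o ho
        rw [hall o (List.mem_of_mem_drop ho)]
        rfl
      simp [firstq, hnone]
    · show (if thr < mnv ∨ tsize (BTree.node (some mnv) sz l r) ≤ lo then none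
        else match firstq l lo thr with
          | some res => some res
          | none =>
            match firstq r (lo - tsize l) thr with
            | some res => some (tsize l + res)
            | none => none) = _
      by_cases hp : thr < mnv
      · have hnone : ((leaves (BTree.node (some mnv) sz l r)).drop lo).findIdx?
            (optP (fun v => decide (v ≤ thr))) = none := by
          rw [List.findIdx?_eq_none_iff]
          intro o ho
          rcases o with _ | x
          · rfl
          · obtain ⟨mn', hmn', hle⟩ := tmin_le (.node (some mnv) sz l r)
              ⟨hl, hr, hsz, hmn⟩ x (List.mem_of_mem_drop ho)
            have hmm : mn' = mnv := by
              have ht : tmin (BTree.node (some mnv) sz l r) = some mnv := rfl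
              rw [ht] at hmn'
              exact Option.some_inj.mp hmn'.symm
            simp only [optP]
            simp
            omega
        rw [if_pos (Or.inl hp), hnone]
        rfl
      · by_cases hlo : tsize (BTree.node (some mnv) sz l r) ≤ lo
        · have hnil : (leaves (BTree.node (some mnv) sz l r)).drop lo = [] := by
            apply List.drop_eq_nil_of_le
            show (leaves l ++ leaves r).length ≤ lo
            rw [List.length_append, ← hlen]
            exact hlo
          rw [if_pos (Or.inr hlo), hnil]
          rfl
        · rw [if_neg (by push_neg; exact ⟨by omega, by omega⟩)]
          show (match firstq l lo thr with
            | some res => some res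
            | none =>
              match firstq r (lo - tsize l) thr with
              | some res => some (tsize l + res)
              | none => none) = _
          rw [ihl hl, ihr hr]
          show _ = (((leaves l ++ leaves r).drop lo).findIdx? _).map _
          rw [List.drop_append, List.findIdx?_append]
          rcases h1 : (((leaves l).drop lo).findIdx? (optP (fun v => decide (v ≤ thr)))) with _ | r1
          · rcases h2 : (((leaves r).drop (lo - (leaves l).length)).findIdx?
                (optP (fun v => decide (v ≤ thr)))) with _ | r2
            · simp [hL, h1, h2]
            · simp only [hL, h1, h2, Option.map_some, Option.map_none, Option.or_none,
                Option.map_map]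
              rw [Option.none_or, Option.map_some]
              have hdl : ((leaves l).drop lo).length = (leaves l).length - lo :=
                List.length_drop
              congr 1
              omega
          · simp only [hL, h1, Option.map_some, Option.or_some, Option.some_or]


theorem build_ok : ∀ (vs : List Int), vs ≠ [] →
    leaves (build vs) = vs.map some ∧ WFt (build vs) := by
  suffices H : ∀ (n : Nat) (vs : List Int), vs.length = n → vs ≠ [] →
      leaves (build vs) = vs.map some ∧ WFt (build vs) by
    exact fun vs hne => H vs.length vs rfl hne
  intro n
  induction n using Nat.strong_induction_on with
  | _ n ih =>
  intro vs hlen hne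
  rw [build]
  by_cases h : vs.length ≤ 1
  · have h1 : vs.length = 1 := by
      cases vs with
      | nil => exact absurd rfl hne
      | cons a l => simp at h ⊢; omega
    obtain ⟨v, rfl⟩ := List.length_eq_one_iff.mp h1
    simp only [if_pos h]
    exact ⟨by simp [leaves], trivial⟩
  · simp only [if_neg h]
    have h2 : 2 ≤ vs.length := by omega
    have hm1 : 1 ≤ vs.length / 2 := by omega
    have hmlt : vs.length / 2 < vs.length := by omega
    have hlt : (vs.take (vs.length / 2)).length = vs.length / 2 := by
      simp; omega
    have hld : (vs.drop (vs.length / 2)).length = vs.length - vs.length / 2 := by simp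
    obtain ⟨el, wl⟩ := ih (vs.take (vs.length / 2)).length (by omega)
      (vs.take (vs.length / 2)) rfl
      (by rw [← List.length_pos_iff]; omega)
    obtain ⟨er, wr⟩ := ih (vs.drop (vs.length / 2)).length (by omega)
      (vs.drop (vs.length / 2)) rfl
      (by rw [← List.length_pos_iff]; omega)
    refine ⟨?_, wl, wr, ?_, rfl⟩
    · show leaves (build _) ++ leaves (build _) = _
      rw [el, er, ← List.map_append, List.take_append_drop]
    · rw [tsize_eq _ wl, tsize_eq _ wr, el, er]
      simp; omega

-- rank lemma: first fitting Option-leaf vs first fitting value of the compressed list,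
-- and deletion at a position vs eraseIdx at its rank
theorem rank_lemma (p : Int → Bool) : ∀ (L : List (Option Int)),
    (L.findIdx? (optP p) = none → (L.filterMap id).findIdx? p = none) ∧
    (∀ r, L.findIdx? (optP p) = some r →
      r < L.length ∧
      ∃ q, (L.filterMap id).findIdx? p = some q ∧
        (L.set r none).filterMap id = (L.filterMap id).eraseIdx q) := by
  intro L
  induction L with
  | nil =>
    refine ⟨fun _ => rfl, fun r h => ?_⟩
    simp at h
  | cons o L ih =>
    obtain ⟨ih1, ih2⟩ := ih
    rcases o with _ | v
    · have hc : List.findIdx? (optP p) (none :: L)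
          = (List.findIdx? (optP p) L).map (· + 1) := by
        rw [List.findIdx?_cons]
        rfl
      refine ⟨?_, ?_⟩
      · intro h
        rw [hc] at h
        have h0 : List.findIdx? (optP p) L = none := by
          cases hx : List.findIdx? (optP p) L with
          | none => rfl
          | some u => rw [hx] at h; simp at h
        rw [show List.filterMap id (none :: L) = List.filterMap id L from rfl]
        exact ih1 h0
      · intro r h
        rw [hc] at h
        obtain ⟨r', hr', hre⟩ := Option.map_eq_some_iff.mp h
        obtain ⟨hlt, q, hq, he⟩ := ih2 r' hr'
        subst hre
        refine ⟨by simp only [List.length_cons]; omega, q, ?_, ?_⟩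
        · rw [show List.filterMap id (none :: L) = List.filterMap id L from rfl]
          exact hq
        · show ((none :: L).set (r' + 1) none).filterMap id = _
          rw [List.set_cons_succ,
            show List.filterMap id (none :: L.set r' none) = List.filterMap id (L.set r' none) from rfl,
            show List.filterMap id (none :: L) = List.filterMap id L from rfl]
          exact he
    · have hc : List.findIdx? (optP p) (some v :: L)
          = if p v = true then some 0 else (List.findIdx? (optP p) L).map (· + 1) := by
        rw [List.findIdx?_cons]
        rfl
      have hfc : List.filterMap id (some v :: L) = v :: List.filterMap id L := rfl
      by_cases hv : p v = true
      · refine ⟨?_, ?_⟩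
        · intro h
          rw [hc, if_pos hv] at h
          exact absurd h (by simp)
        · intro r h
          rw [hc, if_pos hv] at h
          obtain rfl : (0 : Nat) = r := Option.some_inj.mp h
          refine ⟨by simp, 0, ?_, ?_⟩
          · rw [hfc, List.findIdx?_cons, if_pos hv]
          · rw [show ((some v :: L).set 0 none) = none :: L from rfl,
              show List.filterMap id (none :: L) = List.filterMap id L from rfl, hfc]
            rfl
      · refine ⟨?_, ?_⟩
        · intro h
          rw [hc, if_neg hv] at h
          have h0 : List.findIdx? (optP p) L = none := by
            cases hx : List.findIdx? (optP p) L with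
            | none => rfl
            | some u => rw [hx] at h; simp at h
          rw [hfc, List.findIdx?_cons, if_neg hv, ih1 h0]
          rfl
        · intro r h
          rw [hc, if_neg hv] at h
          obtain ⟨r', hr', hre⟩ := Option.map_eq_some_iff.mp h
          obtain ⟨hlt, q, hq, he⟩ := ih2 r' hr'
          subst hre
          refine ⟨by simp only [List.length_cons]; omega, q + 1, ?_, ?_⟩
          · rw [hfc, List.findIdx?_cons, if_neg hv, hq]
            rfl
          · rw [List.set_cons_succ,
              show List.filterMap id (some v :: L.set r' none) = v :: List.filterMap id (L.set r' none) from rfl,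
              hfc, he]
            rfl

theorem loopB_ok (limit : Int) (n : Nat) :
    ∀ (j : Nat) (t : BTree) (ans : Int),
      WFt t → tsize t = n → (leaves t).length = n →
      (∀ p, p < j → (leaves t).getD p none = none) →
      loopB limit t j n ans = ans + greedy limit (((leaves t).drop j).filterMap id) := by
  suffices H : ∀ (k j : Nat) (t : BTree) (ans : Int), n - j = k →
      WFt t → tsize t = n → (leaves t).length = n →
      (∀ p, p < j → (leaves t).getD p none = none) →
      loopB limit t j n ans = ans + greedy limit (((leaves t).drop j).filterMap id) by
    exact fun j t ans h1 h2 h3 h4 => H (n - j) j t ans rfl h1 h2 h3 h4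
  intro k
  induction k using Nat.strong_induction_on with
  | _ k ih =>
  intro j t ans hk hw hts hlen hpre
  by_cases hj : j < n
  · rw [loopB, if_pos hj, getv_ok t hw j]
    have hjL : j < (leaves t).length := by omega
    have hgd : (leaves t).getD j none = (leaves t)[j] := by
      rw [List.getD_eq_getElem?_getD, List.getElem?_eq_getElem hjL]
      rfl
    have hdropj : (leaves t).drop j = (leaves t)[j] :: (leaves t).drop (j + 1) :=
      List.drop_eq_getElem_cons hjL
    cases hLj : (leaves t)[j] with
    | none =>
      have hpre' : ∀ p, p < j + 1 → (leaves t).getD p none = none := by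
        intro p hp
        rcases Nat.lt_or_ge p j with h | h
        · exact hpre p h
        · have : p = j := by omega
          subst this
          rw [hgd, hLj]
      rw [hgd, hLj]
      show loopB limit t (j + 1) n ans = _
      rw [ih (n - (j + 1)) (by omega) (j + 1) t ans rfl hw hts hlen hpre']
      rw [hdropj, hLj]
      rfl
    | some w =>
      rw [hgd, hLj]
      show (match firstq (delv t j) (j + 1) (limit - w) with
        | some k => loopB limit (delv (delv t j) k) (j + 1) n (ans + 1)
        | none => loopB limit (delv t j) (j + 1) n (ans + 1)) = _
      have hset := delv_ok t hw j hjL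
      obtain ⟨e1, w1, s1⟩ := hset
      have hlen1 : (leaves (delv t j)).length = n := by rw [e1, List.length_set, hlen]
      have hts1 : tsize (delv t j) = n := by rw [s1, hts]
      have hdrop1 : (leaves (delv t j)).drop (j + 1) = (leaves t).drop (j + 1) := by
        rw [e1, List.drop_set, if_pos (by omega)]
      rw [firstq_ok (delv t j) w1 (j + 1) (limit - w), hdrop1]
      have hpfx1 : ∀ p, p < j + 1 → (leaves (delv t j)).getD p none = none := by
        intro p hp
        rw [e1, List.getD_eq_getElem?_getD, List.getElem?_set]
        rcases Nat.lt_or_ge p j with h | h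
        · rw [if_neg (by omega)]
          have hp' := hpre p h
          rw [List.getD_eq_getElem?_getD] at hp'
          exact hp'
        · have : p = j := by omega
          subst this
          rw [if_pos rfl, if_pos hjL]
          rfl
      have hpred : (fun x => decide (w + x ≤ limit)) = (fun x => decide (x ≤ limit - w)) := by
        funext x
        exact decide_eq_decide.mpr (by omega)
      have hgreedy : greedy limit (((leaves t).drop j).filterMap id)
          = match (((leaves t).drop (j + 1)).filterMap id).findIdx?
              (optP (fun v => decide (v ≤ limit - w)) ∘ some) with
            | some q => 1 + greedy limit ((((leaves t).drop (j + 1)).filterMap id).eraseIdx q)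
            | none => 1 + greedy limit (((leaves t).drop (j + 1)).filterMap id) := by
        rw [hdropj, hLj, List.filterMap_cons]
        show greedy limit (w :: _) = _
        rw [greedy, hpred]
        rfl
      rcases hf : ((leaves t).drop (j + 1)).findIdx?
          (optP (fun v => decide (v ≤ limit - w))) with _ | rel
      · -- no partner
        obtain ⟨ih1, _⟩ := rank_lemma (fun v => decide (v ≤ limit - w)) ((leaves t).drop (j + 1))
        have hnone := ih1 hf
        show loopB limit (delv t j) (j + 1) n (ans + 1) = _
        rw [ih (n - (j + 1)) (by omega) (j + 1) (delv t j) (ans + 1) rfl w1 hts1 hlen1 hpfx1,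
          hdrop1, hgreedy]
        have : (((leaves t).drop (j + 1)).filterMap id).findIdx?
            (optP (fun v => decide (v ≤ limit - w)) ∘ some) = none := by
          rw [show (optP (fun v => decide (v ≤ limit - w)) ∘ some)
              = (fun v => decide (v ≤ limit - w)) from rfl]
          exact hnone
        rw [this]
        ring
      · -- partner found at absolute position j + 1 + rel
        obtain ⟨_, ih2⟩ := rank_lemma (fun v => decide (v ≤ limit - w)) ((leaves t).drop (j + 1))
        obtain ⟨hrel, q, hq, he⟩ := ih2 rel hf
        show loopB limit (delv (delv t j) (j + 1 + rel)) (j + 1) n (ans + 1) = _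
        have hklt : j + 1 + rel < (leaves (delv t j)).length := by
          rw [hlen1]
          have : ((leaves t).drop (j + 1)).length = n - (j + 1) := by
            rw [List.length_drop, hlen]
          omega
        obtain ⟨e2, w2, s2⟩ := delv_ok (delv t j) w1 (j + 1 + rel) hklt
        have hlen2 : (leaves (delv (delv t j) (j + 1 + rel))).length = n := by
          rw [e2, List.length_set, hlen1]
        have hts2 : tsize (delv (delv t j) (j + 1 + rel)) = n := by rw [s2, hts1]
        have hpfx2 : ∀ p, p < j + 1 → (leaves (delv (delv t j) (j + 1 + rel))).getD p none = none := by
          intro p hp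
          rw [e2, List.getD_eq_getElem?_getD, List.getElem?_set, if_neg (by omega)]
          rw [← List.getD_eq_getElem?_getD]
          exact hpfx1 p hp
        have hdrop2 : (leaves (delv (delv t j) (j + 1 + rel))).drop (j + 1)
            = ((leaves t).drop (j + 1)).set rel none := by
          rw [e2, List.drop_set, if_neg (by omega), ← hdrop1]
          congr 1
          omega
        rw [ih (n - (j + 1)) (by omega) (j + 1) _ (ans + 1) rfl w2 hts2 hlen2 hpfx2,
          hdrop2, he, hgreedy]
        have : (((leaves t).drop (j + 1)).filterMap id).findIdx?
            (optP (fun v => decide (v ≤ limit - w)) ∘ some) = some q := by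
          rw [show (optP (fun v => decide (v ≤ limit - w)) ∘ some)
              = (fun v => decide (v ≤ limit - w)) from rfl]
          exact hq
        rw [this]
        ring
  · rw [loopB, if_neg hj]
    rw [List.drop_eq_nil_of_le (by omega), List.filterMap_nil]
    rw [greedy]
    ring

theorem scanA_spec (limit : Int) (w : Int) (rest : List Int) :
    ∀ j : Nat,
      scanA limit (w :: rest) ((j + 1 : Nat) : Int) ((w :: rest).length : Int)
        = ((rest.drop j).findIdx? (fun x => decide (w + x ≤ limit))).map
            (fun rel => ((j + 1 + rel : Nat) : Int)) := by
  suffices H : ∀ (k j : Nat), rest.length - j = k →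
      scanA limit (w :: rest) ((j + 1 : Nat) : Int) ((w :: rest).length : Int)
        = ((rest.drop j).findIdx? (fun x => decide (w + x ≤ limit))).map
            (fun rel => ((j + 1 + rel : Nat) : Int)) by
    exact fun j => H (rest.length - j) j rfl
  intro k
  induction k using Nat.strong_induction_on with
  | _ k ih =>
  intro j hk
  rw [scanA]
  by_cases hj : j < rest.length
  · rw [if_pos (by push_cast; simp; omega)]
    have hg0 : PySem.List.pyGet? (w :: rest) 0 = some w := by
      have h := PySem.List.pyGet?_natCast (w :: rest) 0
      simpa using h
    have hjs : j + 1 < (w :: rest).length := by simp; omega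
    have hg1 : PySem.List.pyGet? (w :: rest) ((j + 1 : Nat) : Int) = some rest[j] := by
      rw [PySem.List.pyGet?_natCast, List.getElem?_eq_getElem hjs]
      simp
    rw [hg0, hg1]
    show (if w + rest[j] ≤ limit then some ((j + 1 : Nat) : Int)
        else scanA limit (w :: rest) (((j + 1 : Nat) : Int) + 1) (((w :: rest).length : Nat) : Int)) = _
    have hdropj : rest.drop j = rest[j] :: rest.drop (j + 1) := List.drop_eq_getElem_cons hj
    rw [hdropj, List.findIdx?_cons]
    by_cases hle : w + rest[j] ≤ limit
    · rw [if_pos hle, if_pos (by simp [hle])]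
      simp
    · rw [if_neg hle, if_neg (by simp [hle])]
      have hcast : ((j + 1 : Nat) : Int) + 1 = ((j + 1 + 1 : Nat) : Int) := by push_cast; ring
      rw [hcast, ih (rest.length - (j + 1)) (by omega) (j + 1) rfl]
      rw [Option.map_map]
      congr 1
      funext rel
      simp [Function.comp]
      push_cast
      ring
  · rw [if_neg (by push_cast; simp; omega)]
    rw [List.drop_eq_nil_of_le (by omega)]
    rfl

theorem loopA_spec (limit : Int) :
    ∀ (s : List Int) (ans : Int),
      loopA limit s (s.length : Int) ans = ans + greedy limit s := by
  suffices H : ∀ (k : Nat) (s : List Int) (ans : Int), s.length = k →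
      loopA limit s (s.length : Int) ans = ans + greedy limit s by
    exact fun s ans => H s.length s ans rfl
  intro k
  induction k using Nat.strong_induction_on with
  | _ k ih =>
  intro s ans hk
  match s with
  | [] =>
    rw [loopA]
    simp [greedy]
  | [w] =>
    rw [loopA, if_pos (by simp)]
    simp [greedy]
  | w :: x :: rest' =>
    rw [loopA, if_neg (by push_cast; simp; omega)]
    have hscan : scanA limit (w :: x :: rest') 1 (((w :: x :: rest').length : Nat) : Int)
        = ((x :: rest').findIdx? (fun y => decide (w + y ≤ limit))).map
            (fun rel => ((rel + 1 : Nat) : Int)) := by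
      have h := scanA_spec limit w (x :: rest') 0
      rw [List.drop_zero] at h
      rw [show (1 : Int) = ((0 + 1 : Nat) : Int) from by norm_num, h]
      congr 1
      funext rel
      have : 0 + 1 + rel = rel + 1 := by omega
      rw [this]
    rw [hscan]
    rcases hf : (x :: rest').findIdx? (fun y => decide (w + y ≤ limit)) with _ | rel
    · -- no partner: pop the front only
      show (match h0 : PySem.List.pop? (w :: x :: rest') 0 with
        | some (_, s2) => loopA limit s2 (((w :: x :: rest').length : Int) - 1) (ans + 1)
        | none => ans + 1) = _
      split
      · rename_i fst s2 h0
        rw [PySem.List.pop?_zero_cons] at h0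
        simp only [Option.some.injEq, Prod.mk.injEq] at h0
        obtain ⟨-, hs2⟩ := h0
        subst hs2
        have hlen : ((w :: x :: rest').length : Int) - 1 = ((x :: rest').length : Int) := by
          push_cast [List.length_cons]
          ring
        have hg : greedy limit (w :: x :: rest') = 1 + greedy limit (x :: rest') := by
          rw [greedy, hf]
        rw [hlen, ih (x :: rest').length (by simp [← hk]) (x :: rest') (ans + 1) rfl, hg]
        ring
      · rename_i h0
        rw [PySem.List.pop?_zero_cons] at h0
        exact absurd h0 (by simp)
    · -- partner at rest-index rel, absolute index rel + 1
      have hrel : rel < (x :: rest').length :=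
        (List.findIdx?_eq_some_iff_findIdx_eq.mp hf).1
      have habs : rel + 1 < (w :: x :: rest').length := by simp at hrel ⊢; omega
      have hpop1 : PySem.List.pop? (w :: x :: rest') ((rel + 1 : Nat) : Int)
          = some ((w :: x :: rest')[rel + 1], w :: (x :: rest').eraseIdx rel) := by
        rw [PySem.List.pop?_natCast _ (rel + 1) habs, List.eraseIdx_cons_succ]
      show (match h1 : PySem.List.pop? (w :: x :: rest') ((rel + 1 : Nat) : Int) with
        | some (_, s1) =>
          (match h2 : PySem.List.pop? s1 0 with
            | some (_, s2) => loopA limit s2 (((w :: x :: rest').length : Int) - 2) (ans + 1)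
            | none => ans + 1)
        | none => ans + 1) = _
      split
      · rename_i fst s1 h1
        rw [hpop1] at h1
        simp only [Option.some.injEq, Prod.mk.injEq] at h1
        obtain ⟨-, hs1⟩ := h1
        subst hs1
        split
        · rename_i fst2 s2 h2
          rw [PySem.List.pop?_zero_cons] at h2
          simp only [Option.some.injEq, Prod.mk.injEq] at h2
          obtain ⟨-, hs2⟩ := h2
          subst hs2
          have hrl : ((x :: rest').eraseIdx rel).length = (x :: rest').length - 1 := by
            rw [List.length_eraseIdx, if_pos hrel]
          have hlen2 : ((w :: x :: rest').length : Int) - 2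
              = (((x :: rest').eraseIdx rel).length : Int) := by
            rw [hrl]
            simp only [List.length_cons] at hrel ⊢
            push_cast
            omega
          have hg : greedy limit (w :: x :: rest')
              = 1 + greedy limit ((x :: rest').eraseIdx rel) := by
            rw [greedy, hf]
          rw [hlen2, ih ((x :: rest').eraseIdx rel).length
            (by rw [hrl]; simp only [List.length_cons] at hrel hk ⊢; omega)
            ((x :: rest').eraseIdx rel) (ans + 1) rfl, hg]
          ring
        · rename_i h2
          rw [PySem.List.pop?_zero_cons] at h2
          exact absurd h2 (by simp)
      · rename_i h1
        rw [hpop1] at h1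
        exact absurd h1 (by simp)

theorem alt_eq_greedy (people : List Int) (limit : Int) :
    solution_alt people limit = greedy limit people := by
  unfold solution_alt
  match people with
  | [] => simp [greedy]
  | w :: rest =>
    rw [if_neg (by simp)]
    obtain ⟨el, wb⟩ := build_ok (w :: rest) (by simp)
    have hts : tsize (build (w :: rest)) = (w :: rest).length := by
      rw [tsize_eq _ wb, el, List.length_map]
    have hlen : (leaves (build (w :: rest))).length = (w :: rest).length := by
      rw [el, List.length_map]
    rw [loopB_ok limit (w :: rest).length 0 (build (w :: rest)) 0 wb hts hlen
      (fun p hp => absurd hp (Nat.not_lt_zero p))]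
    rw [List.drop_zero, el, List.filterMap_map]
    rw [show (id ∘ some : Int → Option Int) = some from rfl]
    rw [List.filterMap_some]
    ring

-- ===== VERDICT (by name: the statement is the Claim_ definition above) =====
theorem solution_spec : Claim_equal_solution := by
  intro people limit _
  unfold Spec_solution
  have hA : solution people limit = greedy limit people := by
    simpa [solution] using loopA_spec limit people 0
  rw [hA, alt_eq_greedy]
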